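-- pv_equiv track=rewrite | github.com/EinarSolhaug/reder_info | database/processors/content_processor.py | extract_keywords_fast
-- ===== SOURCE A (Python) =====
-- from typing import List, Tuple, Dict, Set
-- from collections import Counter
--
-- def extract_keywords_fast(word_ids: List[int], keywords_dict: Dict[int, List[int]]) -> Dict[int, int]:
--     """
--     Fast keyword extraction using set-based matching.
--
--     Args:
--         word_ids: List of word IDs in the document
--         keywords_dict: {keyword_id: [word_id_1, word_id_2, ...]}
--
--     Returns:
--         {keyword_id: count}
--     """
--     if not keywords_dict:
--         return {}
--
--     # Convert word_ids to Counter for frequency lookup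
--     word_counter = Counter(word_ids)
--
--     # Convert to set for fast membership testing
--     word_id_set = set(word_ids)
--
--     keyword_counts = {}
--
--     for keyword_id, keyword_word_ids in keywords_dict.items():
--         # Check if all keyword words are present
--         keyword_word_set = set(keyword_word_ids)
--
--         if keyword_word_set.issubset(word_id_set):
--             # Calculate minimum occurrence count across all keyword words
--             min_count = min(word_counter[wid] for wid in keyword_word_ids)
--             keyword_counts[keyword_id] = min_count
--
--     return keyword_counts
-- ===== SOURCE B (Python) =====
-- from typing import List, Dict
--
-- def extract_keywords_fast(word_ids: List[int], keywords_dict: Dict[int, List[int]]) -> Dict[int, int]: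
--     # Sorted-array version: no Counter, no membership set, no hash structure at all.
--     # word_ids is sorted once; the frequency of a word is the width of its run in
--     # the sorted list, found by two binary searches (CPython's bisect loops,
--     # written out since the module may not be imported here).  A keyword is kept
--     # exactly when the minimum frequency of its words is positive.
--     sw = sorted(word_ids)
--
--     def count(w):
--         lo, hi = 0, len(sw)            # bisect_left
--         while lo < hi:
--             mid = (lo + hi) // 2
--             if sw[mid] < w:
--                 lo = mid + 1
--             else:
--                 hi = mid
--         left = lo
--         lo, hi = 0, len(sw)            # bisect_right
--         while lo < hi:
--             mid = (lo + hi) // 2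
--             if sw[mid] <= w:
--                 lo = mid + 1
--             else:
--                 hi = mid
--         return lo - left
--
--     return {kid: m
--             for kid, wids in keywords_dict.items()
--             if (m := min(count(w) for w in wids)) > 0}
-- ===== Notes on version B (the rewrite author's own statement) =====
-- stated objective: alternative
-- what changed: B replaces A's hash machinery (Counter, word-id set, issubset branch, accumulated dict) by sorting word_ids once and counting each keyword word as the width of its run in the sorted list via two hand-written binary searches, keeping a keyword iff the minimum count is positive; it trades hash preprocessing for an O(n log n) sort with O(log n) lookups.
import Mathlib
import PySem

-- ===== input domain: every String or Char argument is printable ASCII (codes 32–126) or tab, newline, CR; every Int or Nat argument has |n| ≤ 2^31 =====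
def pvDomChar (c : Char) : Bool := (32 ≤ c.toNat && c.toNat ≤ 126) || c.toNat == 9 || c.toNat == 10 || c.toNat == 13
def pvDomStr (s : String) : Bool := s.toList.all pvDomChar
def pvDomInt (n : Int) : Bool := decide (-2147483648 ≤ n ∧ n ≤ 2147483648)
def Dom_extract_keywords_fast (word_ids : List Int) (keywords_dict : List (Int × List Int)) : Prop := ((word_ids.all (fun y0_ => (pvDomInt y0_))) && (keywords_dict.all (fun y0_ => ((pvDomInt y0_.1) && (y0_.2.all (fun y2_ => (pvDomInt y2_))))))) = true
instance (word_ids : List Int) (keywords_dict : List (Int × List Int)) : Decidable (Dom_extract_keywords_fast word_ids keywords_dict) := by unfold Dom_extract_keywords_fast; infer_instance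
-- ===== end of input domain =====

-- B replaces A's Counter/set/issubset machinery by one sort of word_ids plus two binary
-- searches per word (run width in the sorted list = frequency); objective: alternative.


-- Python's min() over a nonempty int list (first extremal; both Pythons write `min(...)`).
-- On [] Python raises ValueError; Pre_ excludes that input, the 0 is never reached under Pre_.
def pyMinInts (l : List Int) : Int :=
  match l with
  | [] => 0
  | x :: xs => xs.foldl (fun m v => if v < m then v else m) x

-- ===== PORT A =====
def extract_keywords_fast (word_ids : List Int) (keywords_dict : List (Int × List Int)) : List (Int × Int) :=
  if keywords_dict = [] then []
  else
    let word_counter := PySem.Dict.counter word_ids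
    let word_id_set := PySem.Set.ofList word_ids
    (keywords_dict.foldl
      (fun (keyword_counts : PySem.Dict Int Int) kv =>
        let keyword_word_set := PySem.Set.ofList kv.2
        if PySem.Set.issubset keyword_word_set word_id_set then
          keyword_counts.insert kv.1
            (pyMinInts (kv.2.map (fun wid => word_counter.getD wid 0)))
        else keyword_counts)
      PySem.Dict.empty).items

-- ===== PORT B =====
-- Source B's inner `count`: its two hand-written while loops are CPython's bisect_left /
-- bisect_right loops verbatim, so they are ported as the PySem bisect primitives
-- (PySem.List.bisectLeft/bisectRight ARE exactly those loops); `lo - left` is Int subtraction.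
def ekfCount (sw : List Int) (w : Int) : Int :=
  (PySem.List.bisectRight sw w : Int) - (PySem.List.bisectLeft sw w : Int)

-- Source B's dict comprehension over keywords_dict.items(); under Pre_ the keyword ids are
-- distinct (a Python dict's keys), so building the association list by filterMap is exact.
def extract_keywords_fast_alt (word_ids : List Int) (keywords_dict : List (Int × List Int)) : List (Int × Int) :=
  let sw := PySem.List.sorted word_ids (fun x => x)
  keywords_dict.filterMap (fun kv =>
    let m := pyMinInts (kv.2.map (fun w => ekfCount sw w))
    if 0 < m then some (kv.1, m) else none)

-- ===== PRECONDITION & SPEC =====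
-- Pre_ excludes (a) keywords with an empty word list — there Python's min() raises ValueError
-- in A and in B alike — and (b) duplicate keyword ids in the association list, which cannot
-- arise from a Python dict (the list is only the dict's representation).
def Pre_extract_keywords_fast (word_ids : List Int) (keywords_dict : List (Int × List Int)) : Prop :=
  (keywords_dict.map Prod.fst).Nodup ∧ ∀ kv ∈ keywords_dict, kv.2 ≠ []
instance (word_ids : List Int) (keywords_dict : List (Int × List Int)) : Decidable (Pre_extract_keywords_fast word_ids keywords_dict) := by unfold Pre_extract_keywords_fast; infer_instance

def pvWitness_extract_keywords_fast : List Int × (List (Int × List Int)) :=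
  ([1, 2, 1, 3], [(10, [1, 2]), (20, [4])])

def Spec_extract_keywords_fast (word_ids : List Int) (keywords_dict : List (Int × List Int)) (out : List (Int × Int)) : Prop := out = extract_keywords_fast_alt word_ids keywords_dict
instance (word_ids : List Int) (keywords_dict : List (Int × List Int)) (out : List (Int × Int)) : Decidable (Spec_extract_keywords_fast word_ids keywords_dict out) := by unfold Spec_extract_keywords_fast; infer_instance

-- ===== CLAIM (what is proved, stated in full; the proofs are below) =====
def Claim_equal_extract_keywords_fast : Prop := ∀ (word_ids : List Int) (keywords_dict : List (Int × List Int)), Dom_extract_keywords_fast word_ids keywords_dict → Pre_extract_keywords_fast word_ids keywords_dict → Spec_extract_keywords_fast word_ids keywords_dict (extract_keywords_fast word_ids keywords_dict)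

-- ===== LEMMAS AND PROOFS =====

-- min of a nonempty list is positive iff every element is
lemma foldl_min_pos (xs : List Int) (x : Int) :
    0 < xs.foldl (fun m v => if v < m then v else m) x ↔ 0 < x ∧ ∀ v ∈ xs, 0 < v := by
  induction xs generalizing x with
  | nil => simp
  | cons y ys ih =>
    simp only [List.foldl_cons, ih, List.mem_cons]
    constructor
    · rintro ⟨h1, h2⟩
      split_ifs at h1 with h
      · exact ⟨by omega, fun v hv => hv.elim (fun e => e ▸ h1) (h2 v)⟩
      · exact ⟨h1, fun v hv => hv.elim (fun e => e ▸ (by omega)) (h2 v)⟩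
    · rintro ⟨h1, h2⟩
      have hy := h2 y (Or.inl rfl)
      exact ⟨by split_ifs <;> omega, fun v hv => h2 v (Or.inr hv)⟩

-- the issubset test of A is equivalent to "minimum count positive"
lemma subset_iff_min_pos (word_ids : List Int) (w : Int) (ws : List Int) :
    PySem.Set.issubset (PySem.Set.ofList (w :: ws)) (PySem.Set.ofList word_ids) = true ↔
      0 < pyMinInts ((w :: ws).map (fun wid => (PySem.Dict.counter word_ids).getD wid 0)) := by
  have hc : ∀ v : Int, (PySem.Dict.counter word_ids).getD v 0 = (word_ids.count v : Int) :=
    fun v => PySem.Dict.getD_counter word_ids v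
  simp only [PySem.Set.issubset_iff, PySem.Set.mem_ofList, List.map_cons, pyMinInts,
    foldl_min_pos, List.mem_map, List.mem_cons]
  constructor
  · intro h
    refine ⟨?_, ?_⟩
    · rw [hc]; exact_mod_cast List.count_pos_iff.mpr (h w (Or.inl rfl))
    · rintro v ⟨wid, hwid, rfl⟩
      rw [hc]; exact_mod_cast List.count_pos_iff.mpr (h wid (Or.inr hwid))
  · rintro ⟨h1, h2⟩ x hx
    rcases hx with rfl | hx
    · rw [hc] at h1; exact List.count_pos_iff.mp (by exact_mod_cast h1)
    · have := h2 _ ⟨x, hx, rfl⟩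
      rw [hc] at this; exact List.count_pos_iff.mp (by exact_mod_cast this)

-- B's two binary searches on the sorted copy return the run width of w, i.e. its count
lemma ekfCount_eq (word_ids : List Int) (w : Int) :
    ekfCount (PySem.List.sorted word_ids (fun x => x)) w = (word_ids.count w : Int) := by
  set sw := PySem.List.sorted word_ids (fun x => x) with hsw
  have hsorted : sw.Pairwise (fun a b => a ≤ b) := PySem.List.sorted_pairwise word_ids (fun x => x)
  obtain ⟨hLlen, hLlt, hLge⟩ := PySem.List.bisectLeft_spec sw w hsorted
  obtain ⟨hRlen, hRle, hRgt⟩ := PySem.List.bisectRight_spec sw w hsorted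
  set L := PySem.List.bisectLeft sw w with hL
  set R := PySem.List.bisectRight sw w with hR
  have hLR : L ≤ R := by
    by_contra hlt
    push_neg at hlt
    have hRlt : R < sw.length := lt_of_lt_of_le hlt hLlen
    have h1 := hLlt R hRlt hlt
    have h2 := hRgt R hRlt (le_refl R)
    omega
  -- count in the prefix [0, L) is 0: all elements there are < w
  have hpre : (sw.take L).count w = 0 := by
    rw [List.count_eq_zero]
    intro hmem
    obtain ⟨i, hi, hget⟩ := List.mem_iff_getElem.mp hmem
    have hiL : i < L := lt_of_lt_of_le hi (by simp [List.length_take])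
    have hilen : i < sw.length := lt_of_lt_of_le hi (by simp [List.length_take])
    have := hLlt i hilen hiL
    rw [List.getElem_take] at hget
    omega
  -- count in the suffix [R, len) is 0: all elements there are > w
  have hsuf : (sw.drop R).count w = 0 := by
    rw [List.count_eq_zero]
    intro hmem
    obtain ⟨i, hi, hget⟩ := List.mem_iff_getElem.mp hmem
    rw [List.length_drop] at hi
    have hget' : sw[R + i]'(by omega) = w := by rw [← List.getElem_drop]; exact hget
    have := hRgt (R + i) (by omega) (by omega)
    omega
  -- the middle [L, R) consists of w's only
  have hmid : ((sw.take R).drop L).count w = ((sw.take R).drop L).length := by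
    rw [List.count_eq_length]
    intro b hb
    obtain ⟨i, hi, hget⟩ := List.mem_iff_getElem.mp hb
    rw [List.length_drop, List.length_take] at hi
    have hLi : L + i < R := by omega
    have hlen : L + i < sw.length := by omega
    have hget' : sw[L + i]'hlen = b := by
      rw [← hget, List.getElem_drop, List.getElem_take]
    have h1 := hRle (L + i) hlen hLi
    have h2 := hLge (L + i) hlen (by omega)
    omega
  have hmlen : ((sw.take R).drop L).length = R - L := by
    rw [List.length_drop, List.length_take]
    omega
  have h1 : (sw.take R).count w = ((sw.take R).take L).count w + ((sw.take R).drop L).count w := by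
    conv_lhs => rw [← List.take_append_drop L (sw.take R)]
    rw [List.count_append]
  have h2 : (sw.take R).take L = sw.take L := by
    rw [List.take_take]
    congr 1
    omega
  have hsplit : sw.count w = (sw.take L).count w + ((sw.take R).drop L).count w + (sw.drop R).count w := by
    conv_lhs => rw [← List.take_append_drop R sw]
    rw [List.count_append, h1, h2]
  have hcount : sw.count w = R - L := by
    rw [hsplit, hpre, hsuf, hmid, hmlen]
    omega
  have hperm : sw.count w = word_ids.count w := (PySem.List.sorted_perm word_ids (fun x => x) false).count_eq w
  unfold ekfCount
  rw [← hL, ← hR, ← hperm, hcount]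
  omega

-- A's dict-building loop, related to a filterMap over the counter, generalizing the accumulator
lemma loop_items (word_ids : List Int) (kd : List (Int × List Int)) (d : PySem.Dict Int Int)
    (hnd : (kd.map Prod.fst).Nodup) (hne : ∀ kv ∈ kd, kv.2 ≠ [])
    (hfresh : ∀ kv ∈ kd, d.contains kv.1 = false) :
    (kd.foldl
      (fun (keyword_counts : PySem.Dict Int Int) kv =>
        if PySem.Set.issubset (PySem.Set.ofList kv.2) (PySem.Set.ofList word_ids) then
          keyword_counts.insert kv.1
            (pyMinInts (kv.2.map (fun wid => (PySem.Dict.counter word_ids).getD wid 0)))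
        else keyword_counts)
      d).items
    = d.items ++ kd.filterMap (fun kv =>
        let m := pyMinInts (kv.2.map (fun w => (PySem.Dict.counter word_ids).getD w 0))
        if 0 < m then some (kv.1, m) else none) := by
  induction kd generalizing d with
  | nil => simp
  | cons kv rest ih =>
    obtain ⟨k, ws⟩ := kv
    have hwne : ws ≠ [] := hne (k, ws) (List.mem_cons_self)
    obtain ⟨w, ws', rfl⟩ := List.exists_cons_of_ne_nil hwne
    have hiff := subset_iff_min_pos word_ids w ws'
    have hnd' : (rest.map Prod.fst).Nodup := (List.nodup_cons.mp hnd).2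
    have hkrest : ∀ kv' ∈ rest, kv'.1 ≠ k := by
      have hk : k ∉ List.map Prod.fst rest := by
        simp only [List.map_cons, List.nodup_cons] at hnd; exact hnd.1
      intro kv' h hkeq
      exact hk (hkeq ▸ List.mem_map_of_mem (f := Prod.fst) h)
    simp only [List.foldl_cons, List.filterMap_cons]
    by_cases hpos : 0 < pyMinInts ((w :: ws').map (fun wid => (PySem.Dict.counter word_ids).getD wid 0))
    · rw [if_pos (hiff.mpr hpos)]
      rw [ih (d.insert k (pyMinInts ((w :: ws').map (fun wid => (PySem.Dict.counter word_ids).getD wid 0)))) hnd'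
            (fun kv' h => hne kv' (List.mem_cons_of_mem _ h))
            (fun kv' h => by
              rw [PySem.Dict.contains_insert]
              simp [hkrest kv' h, hfresh kv' (List.mem_cons_of_mem _ h)])]
      rw [PySem.Dict.items_insert_of_not_contains]
      · simp only [List.map_cons, PySem.Dict.getD_counter] at hpos
        simp [hpos]
      · exact hfresh (k, w :: ws') List.mem_cons_self
    · rw [if_neg (fun h => hpos (hiff.mp h))]
      rw [ih d hnd' (fun kv' h => hne kv' (List.mem_cons_of_mem _ h))
            (fun kv' h => hfresh kv' (List.mem_cons_of_mem _ h))]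
      simp only [List.map_cons, PySem.Dict.getD_counter] at hpos
      simp [hpos]

-- ===== VERDICT (by name: the statement is the Claim_ definition above) =====
theorem extract_keywords_fast_spec : Claim_equal_extract_keywords_fast := by
  intro word_ids keywords_dict _ hpre
  unfold Spec_extract_keywords_fast extract_keywords_fast extract_keywords_fast_alt
  have hfun : (fun w => ekfCount (PySem.List.sorted word_ids (fun x => x)) w)
      = (fun w => (PySem.Dict.counter word_ids).getD w 0) := by
    funext w
    rw [ekfCount_eq, PySem.Dict.getD_counter]
  by_cases hnil : keywords_dict = []
  · simp [hnil]
  · rw [if_neg hnil]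
    rw [loop_items word_ids keywords_dict PySem.Dict.empty hpre.1 hpre.2
          (fun kv _ => PySem.Dict.contains_empty kv.1)]
    simp only [PySem.Dict.empty, hfun]
    rfl
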